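-- pv_equiv track=rewrite | github.com/sun10081/leetcode_practice_xiaorui | questions/2501_2600/2531_2540/2530_maximal_score.py | maxKelements
-- ===== SOURCE A (Python) =====
-- import heapq
-- from typing import List
--
-- def maxKelements(nums: List[int], k: int) -> int:
--     nums = [-num for num in nums]
--     heapq.heapify(nums)
--     ans = 0
--
--     while k:
--         ans -= heapq.heapreplace(nums, nums[0] // 3)
--         k -= 1
--     return ans
-- ===== SOURCE B (Python) =====
-- from typing import List
--
-- def maxKelements(nums: List[int], k: int) -> int:
--     # Heap-free: repeated linear max scan over a local copy; replaces the max
--     # in place with its ceiling third. Does not mutate the caller's list.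
--     arr = list(nums)
--     ans = 0
--     for _ in range(k):
--         m = arr[0]              # IndexError on empty input, like A's heapreplace
--         for v in arr:
--             if v > m:
--                 m = v
--         ans += m
--         arr[arr.index(m)] = -((-m) // 3)   # ceil(m/3), sign-correct
--     return ans
-- ===== Notes on version B (the rewrite author's own statement) =====
-- stated objective: simpler
-- what changed: Replaces the negated min-heap (heapify/heapreplace) with k linear max-scans over a plain mutable copy of the list, writing the ceiling-third back in place; no heap, no negation trick.
import Mathlib
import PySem

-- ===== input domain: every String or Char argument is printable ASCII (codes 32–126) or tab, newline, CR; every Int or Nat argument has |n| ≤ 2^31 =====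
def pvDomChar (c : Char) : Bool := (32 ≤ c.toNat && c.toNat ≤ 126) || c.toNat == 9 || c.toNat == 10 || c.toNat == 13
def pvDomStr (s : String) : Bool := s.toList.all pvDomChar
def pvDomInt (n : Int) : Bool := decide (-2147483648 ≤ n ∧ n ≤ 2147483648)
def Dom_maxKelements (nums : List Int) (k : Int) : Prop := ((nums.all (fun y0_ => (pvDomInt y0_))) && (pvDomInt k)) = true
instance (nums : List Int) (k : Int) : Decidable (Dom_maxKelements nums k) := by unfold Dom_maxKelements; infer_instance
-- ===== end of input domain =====

-- B replaces A's negated min-heap with k linear max-scans over a mutable copy (simpler, heap-free);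
-- return-value equivalence only: A mutates nothing observable (it rebinds nums), B copies first.

-- ===== PORT A =====
-- heapq is modeled by its min-extraction semantics: the heap is the plain list of its
-- elements, heapreplace returns the current minimum and replaces one occurrence of it
-- with the pushed value (exact for A's return value, which depends only on the multiset).
def pvReplaceFirst : List Int → Int → Int → List Int
  | [], _, _ => []
  | a :: t, x, y => if a = x then y :: t else a :: pvReplaceFirst t x y

-- 'while k: … ; k -= 1' runs k.toNat times (a negative k makes Python diverge; excluded by Pre_).
def pvHeapLoop : Nat → List Int → Int → Int
  | 0, _, ans => ans
  | n + 1, heap, ans =>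
    match heap.min? with
    | none => ans   -- heapreplace raises IndexError on an empty heap; excluded by Pre_
    | some mu => pvHeapLoop n (pvReplaceFirst heap mu (PySem.Int.floordiv mu 3)) (ans - mu)

def maxKelements (nums : List Int) (k : Int) : Int :=
  pvHeapLoop k.toNat (nums.map (fun num => -num)) 0

-- ===== PORT B =====
def pvScanMax : List Int → Int → Int
  | [], m => m
  | v :: t, m => pvScanMax t (if v > m then v else m)

def pvAltLoop : Nat → List Int → Int → Int
  | 0, _, ans => ans
  | n + 1, arr, ans =>
    match arr with
    | [] => ans   -- arr[0] raises IndexError in Python; excluded by Pre_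
    | a0 :: _ =>
      let m := pvScanMax arr a0
      let arr' := match PySem.List.index? arr m with   -- arr[arr.index(m)] = -((-m) // 3)
        | some i => arr.set i (-(PySem.Int.floordiv (-m) 3))
        | none => arr
      pvAltLoop n arr' (ans + m)

def maxKelements_alt (nums : List Int) (k : Int) : Int :=
  pvAltLoop k.toNat nums 0

-- ===== PRECONDITION & SPEC =====
-- Pre_ excludes only inputs where Python A does not return: k < 0 (the while loop never
-- terminates) and nums = [] with k ≠ 0 (heapreplace raises IndexError).
def Pre_maxKelements (nums : List Int) (k : Int) : Prop := 0 ≤ k ∧ (k = 0 ∨ nums ≠ [])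
instance (nums : List Int) (k : Int) : Decidable (Pre_maxKelements nums k) := by
  unfold Pre_maxKelements; infer_instance
def pvWitness_maxKelements : List Int × Int := ([5, 1], 2)

def Spec_maxKelements (nums : List Int) (k : Int) (out : Int) : Prop := out = maxKelements_alt nums k
instance (nums : List Int) (k : Int) (out : Int) : Decidable (Spec_maxKelements nums k out) := by
  unfold Spec_maxKelements; infer_instance

-- ===== CLAIM (what is proved, stated in full; the proofs are below) =====
def Claim_equal_maxKelements : Prop := ∀ (nums : List Int) (k : Int), Dom_maxKelements nums k → Pre_maxKelements nums k → Spec_maxKelements nums k (maxKelements nums k)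

-- ===== LEMMAS AND PROOFS =====

lemma pv_foldl_min_neg (t : List Int) : ∀ a : Int,
    (t.map (fun x => -x)).foldl min (-a) = -(t.foldl max a) := by
  induction t with
  | nil => intro a; rfl
  | cons v t ih =>
    intro a
    simp only [List.map_cons, List.foldl_cons]
    rw [show min (-a) (-v) = -(max a v) by omega]
    exact ih (max a v)

-- the heap minimum of the negated list is minus B's scanned maximum
lemma pv_min_neg_eq_scanMax (a0 : Int) (t : List Int) :
    ((a0 :: t).map (fun x => -x)).min? = some (-(pvScanMax (a0 :: t) a0)) := by
  have hscan : ∀ (l : List Int) (m : Int), pvScanMax l m = l.foldl max m := by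
    intro l
    induction l with
    | nil => intro m; rfl
    | cons v l ih =>
      intro m
      simp only [pvScanMax, List.foldl_cons, ih]
      congr 1
      omega
  simp only [List.map_cons, List.min?_cons', pvScanMax, hscan]
  rw [show (if a0 > a0 then a0 else a0) = a0 by simp]
  rw [pv_foldl_min_neg]

lemma pv_scanMax_mem : ∀ (t : List Int) (m : Int), pvScanMax t m = m ∨ pvScanMax t m ∈ t := by
  intro t
  induction t with
  | nil => intro m; exact Or.inl rfl
  | cons v t ih =>
    intro m
    simp only [pvScanMax]
    rcases ih (if v > m then v else m) with h | h
    · rw [h]; split <;> simp_all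
    · exact Or.inr (List.mem_cons_of_mem _ h)

-- replacing the first occurrence commutes with negation
lemma pv_replaceFirst_neg : ∀ (l : List Int) (m y : Int),
    pvReplaceFirst (l.map (fun x => -x)) (-m) y
      = (pvReplaceFirst l m (-y)).map (fun x => -x) := by
  intro l
  induction l with
  | nil => intro m y; rfl
  | cons a t ih =>
    intro m y
    simp only [List.map_cons, pvReplaceFirst]
    by_cases h : a = m
    · simp [h, neg_neg]
    · rw [if_neg (by omega), if_neg h, List.map_cons, ih]

-- B's arr[arr.index(m)] = v is replace-first-occurrence
lemma pv_index_set_eq_replaceFirst : ∀ (l : List Int) (m v : Int), m ∈ l →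
    (match PySem.List.index? l m with
      | some i => l.set i v
      | none => l) = pvReplaceFirst l m v := by
  intro l
  induction l with
  | nil => intro m v h; cases h
  | cons a t ih =>
    intro m v hm
    by_cases h : a = m
    · subst h
      rw [PySem.List.index?_cons_self]
      simp [pvReplaceFirst]
    · have hmt : m ∈ t := by cases hm with
        | head => exact absurd rfl h
        | tail _ h' => exact h'
      rw [PySem.List.index?_cons_of_ne t h]
      have := ih m v hmt
      rcases hsome : PySem.List.index? t m with _ | i
      · rw [PySem.List.index?_eq_none_iff] at hsome; exact absurd hmt hsome
      · simp only [hsome, Option.map_some] at this ⊢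
        simp only [List.set_cons_succ, pvReplaceFirst, if_neg h]
        rw [this]

lemma pv_loop_eq : ∀ (n : Nat) (arr : List Int) (ans : Int),
    pvHeapLoop n (arr.map (fun x => -x)) ans = pvAltLoop n arr ans := by
  intro n
  induction n with
  | zero => intro arr ans; rfl
  | succ n ih =>
    intro arr ans
    cases arr with
    | nil => rfl
    | cons a0 t =>
      set m := pvScanMax (a0 :: t) a0 with hm
      have hmmem : m ∈ a0 :: t := by
        rcases pv_scanMax_mem (a0 :: t) a0 with h | h
        · rw [hm, h]; exact List.mem_cons_self
        · rw [hm]; exact h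
      simp only [pvHeapLoop, pvAltLoop, pv_min_neg_eq_scanMax, ← hm]
      rw [pv_index_set_eq_replaceFirst _ m _ hmmem]
      rw [pv_replaceFirst_neg]
      rw [show ans - -m = ans + m by ring]
      exact ih _ _

-- ===== VERDICT (by name: the statement is the Claim_ definition above) =====
theorem maxKelements_spec : Claim_equal_maxKelements := by
  intro nums k _ _
  unfold Spec_maxKelements maxKelements maxKelements_alt
  exact pv_loop_eq k.toNat nums 0
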